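-- pv_equiv track=rewrite | github.com/phdavis1027/Phonetic-Cubes | python_scripts/gen_hypercube.py | distinguishes
-- ===== SOURCE A (Python) =====
-- def distinguishes(segments, features):
--     indices = []
--     for segment in segments:
--         seg_index = {f:0 for f in features} # has to be a dictionary so order doesn't get in the way
--         for k in seg_index.keys():
--             if k in segment:
--                 seg_index[k] = 1 # assign an index to every segment based on the segments
--         if seg_index in indices: # if we've seen that index before, it can't be distinguished
--             return False
--         else:
--             indices.append(seg_index)
--     return True
-- ===== SOURCE B (Python) =====
-- def distinguishes(segments, features):
--     vecs = sorted(tuple(1 if f in segment else 0 for f in features)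
--                   for segment in segments)
--     return all(prev != cur for prev, cur in zip(vecs, vecs[1:]))
-- ===== Notes on version B (the rewrite author's own statement) =====
-- stated objective: alternative
-- what changed: A checks each segment's feature-dict against a growing list of previously seen dicts (quadratic scan with early exit); B materialises all 0/1 indicator tuples, sorts them, and returns whether no adjacent pair of the sorted list is equal.
import Mathlib
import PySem

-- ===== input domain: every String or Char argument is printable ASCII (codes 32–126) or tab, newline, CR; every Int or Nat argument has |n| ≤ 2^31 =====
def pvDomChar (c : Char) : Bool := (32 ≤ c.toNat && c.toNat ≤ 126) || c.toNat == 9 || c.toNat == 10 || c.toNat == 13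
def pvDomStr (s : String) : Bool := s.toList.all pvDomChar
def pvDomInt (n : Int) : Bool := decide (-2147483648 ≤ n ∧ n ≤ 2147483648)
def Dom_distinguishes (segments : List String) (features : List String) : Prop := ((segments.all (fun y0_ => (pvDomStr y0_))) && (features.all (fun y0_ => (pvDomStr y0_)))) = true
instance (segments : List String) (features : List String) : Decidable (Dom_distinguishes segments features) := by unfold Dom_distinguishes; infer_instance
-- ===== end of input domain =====

-- B replaces A's quadratic scan of an accumulating list of feature-dicts by
-- building all indicator vectors, sorting them, and comparing adjacent pairs.


-- ===== PORT A =====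
-- seg_index = {f:0 for f in features}; for k in seg_index.keys(): if k in segment: seg_index[k] = 1
def segDict (features : List String) (segment : String) : PySem.Dict String Int :=
  let d0 := features.foldl (fun d f => d.insert f 0) PySem.Dict.empty
  d0.keys.foldl (fun d k => if PySem.Str.isIn k segment then d.insert k 1 else d) d0

-- Python's `x in list` scans for the first equal element; dict == is exact as
-- structural equality here because every dict in `indices` is a segDict over the
-- SAME features, hence has the identical key list.
def dictIn (d : PySem.Dict String Int) : List (PySem.Dict String Int) → Bool
  | [] => false
  | e :: t => if d = e then true else dictIn d t

-- the main loop with early return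
def aLoop (features : List String) : List String → List (PySem.Dict String Int) → Bool
  | [], _ => true
  | segment :: rest, indices =>
    let si := segDict features segment
    if dictIn si indices then false else aLoop features rest (indices ++ [si])

def distinguishes (segments : List String) (features : List String) : Bool :=
  aLoop features segments []

-- ===== PORT B =====
-- vecs = sorted(tuple(1 if f in segment else 0 for f in features) for segment in segments)
-- return all(prev != cur for prev, cur in zip(vecs, vecs[1:]))
-- sorted(...) on tuples of ints: Python's lexicographic tuple order = the List
-- linear order used here (instance given explicitly so the order lemmas apply)
def distinguishes_alt (segments : List String) (features : List String) : Bool :=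
  let vecs := @PySem.List.sorted (List Int) (List Int) _ LinearOrder.toDecidableLT
    (segments.map (fun segment =>
      features.map (fun f => if PySem.Str.isIn f segment then (1 : Int) else 0)))
    (fun v => v) false
  (vecs.zip (PySem.List.slice vecs (some 1) none)).all (fun pc => decide (pc.1 ≠ pc.2))

-- ===== PRECONDITION & SPEC =====
def Spec_distinguishes (segments : List String) (features : List String) (out : Bool) : Prop := out = distinguishes_alt segments features
instance (segments : List String) (features : List String) (out : Bool) : Decidable (Spec_distinguishes segments features out) := by unfold Spec_distinguishes; infer_instance

-- ===== CLAIM (what is proved, stated in full; the proofs are below) =====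
def Claim_equal_distinguishes : Prop := ∀ (segments : List String) (features : List String), Dom_distinguishes segments features → Spec_distinguishes segments features (distinguishes segments features)

-- ===== LEMMAS AND PROOFS =====

-- the indicator value of feature f for a segment
def ind (f : String) (segment : String) : Int :=
  if PySem.Str.isIn f segment then 1 else 0

-- the indicator vector of a segment over the full feature list
def vec (features : List String) (segment : String) : List Int :=
  features.map (fun f => ind f segment)

-- ---- characterisation of segDict by keys and lookups ----

theorem getD_foldl_insert_zero (fs : List String) (d : PySem.Dict String Int) (x : String)
    (h : ∀ y, d.getD y 0 = 0) : (fs.foldl (fun d f => d.insert f 0) d).getD x 0 = 0 := by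
  induction fs generalizing d with
  | nil => exact h x
  | cons f t ih =>
    exact ih _ (fun y => by rw [PySem.Dict.getD_insert]; split <;> simp [h])

theorem getD_foldl_insert_one (l : List String) (d : PySem.Dict String Int) (x : String) :
    (l.foldl (fun d k => d.insert k 1) d).getD x 0 = if x ∈ l then 1 else d.getD x 0 := by
  induction l generalizing d with
  | nil => simp
  | cons k t ih =>
    simp only [List.foldl_cons, ih, PySem.Dict.getD_insert, List.mem_cons]
    by_cases hx : x ∈ t <;> by_cases hk : x = k <;> simp [hx, hk]

theorem set_update_subset (s : PySem.Set String) (l : List String) (h : ∀ x ∈ l, x ∈ s) :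
    PySem.Set.update s l = s := by
  induction l generalizing s with
  | nil => rfl
  | cons k t ih =>
    have hk : PySem.Set.add s k = s := by
      simp [PySem.Set.add, PySem.Set.contains, h k (by simp)]
    simp only [PySem.Set.update, List.foldl_cons] at *
    rw [hk]; exact ih s (fun x hx => h x (by simp [hx]))

theorem dictIn_iff (d : PySem.Dict String Int) (l : List (PySem.Dict String Int)) :
    dictIn d l = true ↔ d ∈ l := by
  induction l with
  | nil => simp [dictIn]
  | cons e t ih => by_cases h : d = e <;> simp [dictIn, h, ih]

theorem keys_segDict (fs : List String) (s : String) :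
    (segDict fs s).keys = PySem.Set.ofList fs := by
  simp only [segDict]
  set d0 : PySem.Dict String Int := fs.foldl (fun d f => d.insert f 0) PySem.Dict.empty with hd0
  rw [PySem.List.foldl_if_eq_foldl_filter (fun k => PySem.Str.isIn k s)
        (fun (d : PySem.Dict String Int) k => d.insert k 1) d0.keys d0]
  rw [PySem.Dict.keys_foldl_insert]
  have h0 : d0.keys = PySem.Set.ofList fs := by
    rw [hd0, PySem.Dict.keys_foldl_insert]
    simp [PySem.Set.ofList_eq_foldl, PySem.Set.update]
  rw [h0]
  exact set_update_subset _ _ (fun x hx => List.mem_of_mem_filter hx)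

theorem getD_segDict (fs : List String) (s : String) (f : String) (hf : f ∈ fs) :
    (segDict fs s).getD f 0 = ind f s := by
  simp only [segDict]
  set d0 : PySem.Dict String Int := fs.foldl (fun d f => d.insert f 0) PySem.Dict.empty with hd0
  rw [PySem.List.foldl_if_eq_foldl_filter (fun k => PySem.Str.isIn k s)
        (fun (d : PySem.Dict String Int) k => d.insert k 1) d0.keys d0]
  rw [getD_foldl_insert_one]
  have h0 : d0.keys = PySem.Set.ofList fs := by
    rw [hd0, PySem.Dict.keys_foldl_insert]
    simp [PySem.Set.ofList_eq_foldl, PySem.Set.update]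
  have hmem : f ∈ d0.keys := by
    rw [h0]; exact (PySem.Set.mem_ofList fs f).2 hf
  by_cases hin : PySem.Str.isIn f s = true
  · have h1 : ind f s = 1 := by unfold ind; rw [if_pos hin]
    rw [h1]
    have hmf : f ∈ List.filter (fun k => PySem.Str.isIn k s) d0.keys :=
      List.mem_filter.2 ⟨hmem, hin⟩
    rw [if_pos hmf]
  · have h0' : ind f s = 0 := by unfold ind; rw [if_neg hin]
    rw [h0']
    have hnf : f ∉ List.filter (fun k => PySem.Str.isIn k s) d0.keys := by
      intro hc; exact hin (List.mem_filter.1 hc).2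
    rw [if_neg hnf, hd0]
    exact getD_foldl_insert_zero fs _ f (fun y => by simp)

theorem nodup_keys_segDict (fs : List String) (s : String) :
    (segDict fs s).keys.Nodup := by
  rw [keys_segDict]; exact PySem.Set.nodup_ofList fs

theorem segDict_eq_iff (fs : List String) (s₁ s₂ : String) :
    segDict fs s₁ = segDict fs s₂ ↔ vec fs s₁ = vec fs s₂ := by
  constructor
  · intro h
    unfold vec
    refine List.map_congr_left (fun f hf => ?_)
    have := congrArg (fun d => PySem.Dict.getD d f 0) h
    simpa [getD_segDict fs _ f hf] using this
  · intro h
    have hind : ∀ f ∈ fs, ind f s₁ = ind f s₂ := by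
      intro f hf
      unfold vec at h
      exact List.map_inj_left.1 h f hf
    apply PySem.Dict.ext
    rw [PySem.Dict.items_eq_map_keys _ (nodup_keys_segDict fs s₁) 0,
        PySem.Dict.items_eq_map_keys _ (nodup_keys_segDict fs s₂) 0,
        keys_segDict, keys_segDict]
    refine List.map_congr_left (fun f hf => ?_)
    have hffs : f ∈ fs := (PySem.Set.mem_ofList fs f).1 hf
    rw [getD_segDict fs _ f hffs, getD_segDict fs _ f hffs, hind f hffs]

-- ---- A's loop computes Nodup of the dict list ----

theorem aLoop_eq_nodup (fs : List String) (segs : List String)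
    (acc : List (PySem.Dict String Int)) (hacc : acc.Nodup) :
    aLoop fs segs acc = decide ((acc ++ segs.map (segDict fs)).Nodup) := by
  induction segs generalizing acc with
  | nil => simp [aLoop, hacc]
  | cons seg rest ih =>
    simp only [aLoop, List.map_cons]
    by_cases hmem : segDict fs seg ∈ acc
    · have hnn : ¬ (acc ++ segDict fs seg :: rest.map (segDict fs)).Nodup := by
        intro hnd
        have := List.disjoint_of_nodup_append hnd
        exact this hmem (by simp)
      rw [if_pos ((dictIn_iff _ _).2 hmem)]
      simp [hnn]
    · have hacc' : (acc ++ [segDict fs seg]).Nodup := by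
        refine List.nodup_append.2 ⟨hacc, List.nodup_singleton _, ?_⟩
        intro a ha b hb h
        rw [List.mem_singleton] at hb
        subst hb
        exact hmem (h ▸ ha)
      have hni : ¬ dictIn (segDict fs seg) acc = true := by
        rw [dictIn_iff]; exact hmem
      rw [if_neg hni, ih _ hacc']
      congr 1
      rw [List.append_assoc, List.singleton_append]

-- ---- B's adjacent scan on a sorted list computes Nodup ----

theorem adj_all_eq_nodup (sv : List (List Int)) (hs : sv.Pairwise (· ≤ ·)) :
    ((sv.zip (sv.drop 1)).all (fun pc => decide (pc.1 ≠ pc.2))) = decide sv.Nodup := by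
  induction sv with
  | nil => simp
  | cons x t ih =>
    cases t with
    | nil => simp
    | cons y u =>
      have hx : ∀ b ∈ y :: u, x ≤ b := (List.pairwise_cons.1 hs).1
      have ht : (y :: u).Pairwise (· ≤ ·) := (List.pairwise_cons.1 hs).2
      have hy : ∀ b ∈ u, y ≤ b := (List.pairwise_cons.1 ht).1
      have ih' := ih ht
      simp only [List.drop_succ_cons, List.drop_zero] at ih'
      simp only [List.drop_succ_cons, List.drop_zero, List.zip_cons_cons, List.all_cons, ih']
      by_cases hxy : x = y
      · subst hxy; simp
      · have hnx : x ∉ y :: u := by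
          intro hmem
          rcases List.mem_cons.1 hmem with rfl | hxu
          · exact hxy rfl
          · exact hxy (le_antisymm (hx y (by simp)) (hy x hxu))
        simp [hxy, List.nodup_cons, hnx]

theorem alt_eq_nodup (segments fs : List String) :
    distinguishes_alt segments fs = decide ((segments.map (vec fs)).Nodup) := by
  have hvec : (segments.map (fun segment =>
      fs.map (fun f => if PySem.Str.isIn f segment then (1 : Int) else 0)))
      = segments.map (vec fs) := by
    simp [vec, ind]
  simp only [distinguishes_alt, hvec]
  set sv := @PySem.List.sorted (List Int) (List Int) _ LinearOrder.toDecidableLT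
    (segments.map (vec fs)) (fun v => v) false with hsv
  have hslice : PySem.List.slice sv (some 1) none = sv.drop 1 := by
    simp [PySem.List.slice_from]
  have hpw : sv.Pairwise (· ≤ ·) := by
    rw [hsv]
    exact PySem.List.sorted_pairwise (segments.map (vec fs)) (fun v => v)
  rw [hslice, adj_all_eq_nodup sv hpw]
  have hperm : sv.Perm (segments.map (vec fs)) := by
    rw [hsv]
    exact @PySem.List.sorted_perm (List Int) (List Int) _ LinearOrder.toDecidableLT _ _ _
  simp [hperm.nodup_iff]

-- ===== VERDICT (by name: the statement is the Claim_ definition above) =====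
theorem distinguishes_spec : Claim_equal_distinguishes := by
  intro segments features _
  unfold Spec_distinguishes
  rw [alt_eq_nodup segments features]
  unfold distinguishes
  rw [aLoop_eq_nodup features segments [] List.nodup_nil]
  simp only [List.nil_append]
  congr 1
  rw [List.nodup_iff_pairwise_ne, List.nodup_iff_pairwise_ne,
      List.pairwise_map, List.pairwise_map]
  refine propext ⟨fun h => h.imp ?_, fun h => h.imp ?_⟩
  · exact fun {a b} hab hc => hab ((segDict_eq_iff features a b).2 hc)
  · exact fun {a b} hab hc => hab ((segDict_eq_iff features a b).1 hc)
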